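-- pv_equiv track=rewrite | github.com/ranparabhautik/Financial-Assistant-with-Chatbot | expenses.py | categorize_expenses
-- ===== SOURCE A (Python) =====
-- def categorize_expenses(expenses):
--     from collections import defaultdict
--     buckets = defaultdict(int)
--     for val in expenses:
--         if val < 100:
--             buckets['Low'] += val
--         elif val < 300:
--             buckets['Medium'] += val
--         else:
--             buckets['High'] += val
--     return dict(buckets)
-- ===== SOURCE B (Python) =====
-- def categorize_expenses(expenses):
--     def label(v):
--         return 'Low' if v < 100 else ('Medium' if v < 300 else 'High')
--     keys = list(dict.fromkeys(label(v) for v in expenses))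
--     return {k: sum(v for v in expenses if label(v) == k) for k in keys}
-- ===== Notes on version B (the rewrite author's own statement) =====
-- stated objective: alternative
-- what changed: A accumulates into a defaultdict in one branching loop; B first maps each value to its bucket label, dedups the labels in first-occurrence order, then builds the dict by a per-key filtered sum comprehension.
import Mathlib
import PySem

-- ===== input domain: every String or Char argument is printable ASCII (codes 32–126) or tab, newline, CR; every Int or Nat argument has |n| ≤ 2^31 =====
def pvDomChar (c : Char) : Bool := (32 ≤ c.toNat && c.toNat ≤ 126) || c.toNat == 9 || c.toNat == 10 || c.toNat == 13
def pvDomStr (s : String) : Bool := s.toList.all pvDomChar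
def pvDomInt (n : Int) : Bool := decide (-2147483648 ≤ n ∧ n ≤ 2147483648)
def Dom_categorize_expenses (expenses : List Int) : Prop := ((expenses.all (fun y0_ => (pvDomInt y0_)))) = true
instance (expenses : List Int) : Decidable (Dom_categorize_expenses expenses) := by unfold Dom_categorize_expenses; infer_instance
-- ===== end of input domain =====

-- B replaces A's single branching accumulation loop by a label map + first-occurrence
-- dedup + per-key filtered-sum comprehension (alternative decomposition, same cost).

-- ===== PORT A =====
-- one loop over expenses, defaultdict(int) accumulation with the if/elif/else inline
def categorize_expenses (expenses : List Int) : List (String × Int) :=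
  (expenses.foldl
    (fun buckets val =>
      if val < 100 then buckets.modify "Low" 0 (fun w => w + val)
      else if val < 300 then buckets.modify "Medium" 0 (fun w => w + val)
      else buckets.modify "High" 0 (fun w => w + val))
    (PySem.Dict.empty : PySem.Dict String Int)).items

-- ===== PORT B =====
def pvLabel (v : Int) : String :=
  if v < 100 then "Low" else if v < 300 then "Medium" else "High"

def categorize_expenses_alt (expenses : List Int) : List (String × Int) :=
  (PySem.Set.ofList (expenses.map pvLabel)).map
    (fun k => (k, (expenses.filter (fun v => pvLabel v == k)).sum))

-- ===== PRECONDITION & SPEC =====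
def Spec_categorize_expenses (expenses : List Int) (out : List (String × Int)) : Prop := out = categorize_expenses_alt expenses
instance (expenses : List Int) (out : List (String × Int)) : Decidable (Spec_categorize_expenses expenses out) := by unfold Spec_categorize_expenses; infer_instance

-- ===== CLAIM (what is proved, stated in full; the proofs are below) =====
def Claim_equal_categorize_expenses : Prop := ∀ (expenses : List Int), Dom_categorize_expenses expenses → Spec_categorize_expenses expenses (categorize_expenses expenses)

-- ===== LEMMAS AND PROOFS =====

-- A's branching loop body is accumulation keyed by pvLabel
theorem pvStep_eq :
    (fun (buckets : PySem.Dict String Int) (val : Int) =>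
      if val < 100 then buckets.modify "Low" 0 (fun w => w + val)
      else if val < 300 then buckets.modify "Medium" 0 (fun w => w + val)
      else buckets.modify "High" 0 (fun w => w + val))
    = fun buckets val => buckets.modify (pvLabel val) 0 (fun w => w + val) := by
  funext buckets val
  unfold pvLabel
  split_ifs <;> rfl

-- lookup in A's accumulated dict = sum of the values with that label
theorem pvGetD_fold (l : List Int) (d : PySem.Dict String Int) (k : String) :
    (l.foldl (fun buckets val => buckets.modify (pvLabel val) 0 (fun w => w + val)) d).getD k 0
      = d.getD k 0 + (l.filter (fun v => pvLabel v == k)).sum := by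
  induction l generalizing d with
  | nil => simp
  | cons x xs ih =>
    simp only [List.foldl_cons, List.filter_cons, ih]
    rw [PySem.Dict.getD_modify]
    by_cases h : k = pvLabel x
    · simp [h, List.sum_cons]; ring
    · have : (pvLabel x == k) = false := by simp [Ne.symm h]
      simp [h, this]

theorem categorize_expenses_eq (expenses : List Int) :
    categorize_expenses expenses = categorize_expenses_alt expenses := by
  unfold categorize_expenses categorize_expenses_alt
  rw [pvStep_eq]
  have hkeys := PySem.Dict.keys_foldl_modify_key expenses pvLabel 0
      (fun _ val w => w + val) (PySem.Dict.empty : PySem.Dict String Int)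
  have hnd := PySem.Dict.nodup_keys_foldl_modify_key expenses pvLabel 0
      (fun _ val w => w + val) (PySem.Dict.empty : PySem.Dict String Int)
      (by simp)
  rw [PySem.Dict.items_eq_map_keys _ hnd 0, hkeys]
  have hupd : PySem.Set.update (PySem.Dict.empty : PySem.Dict String Int).keys
      (expenses.map pvLabel) = PySem.Set.ofList (expenses.map pvLabel) := by
    simp [PySem.Set.update, PySem.Set.ofList, PySem.Dict.keys_empty]
  rw [hupd]
  apply List.map_congr_left
  intro k _
  rw [pvGetD_fold]
  simp [PySem.Dict.getD_empty]

-- ===== VERDICT (by name: the statement is the Claim_ definition above) =====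
theorem categorize_expenses_spec : Claim_equal_categorize_expenses := by
  intro expenses _
  exact categorize_expenses_eq expenses
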